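-- pv_equiv track=rewrite | github.com/timburr1/everybody-codes | 2024/01/part1.py | count_pots
-- ===== SOURCE A (Python) =====
-- def count_pots(input):
--     p = 0
--     for i in range(len(input)):
--         if input[i] == 'B':
--             p += 1
--         elif input[i] == 'C':
--             p += 3
--     return p
-- ===== SOURCE B (Python) =====
-- def count_pots(input):
--     freq = {}
--     for ch in input:
--         freq[ch] = freq.get(ch, 0) + 1
--     return freq.get('B', 0) + 3 * freq.get('C', 0)
-- ===== Notes on version B (the rewrite author's own statement) =====
-- stated objective: alternative
-- what changed: Instead of A's index loop with an if/elif running total, B builds a character-frequency dictionary in one unconditional pass and then combines the two relevant frequencies arithmetically; no branching accumulator and no index arithmetic remain.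
import Mathlib
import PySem

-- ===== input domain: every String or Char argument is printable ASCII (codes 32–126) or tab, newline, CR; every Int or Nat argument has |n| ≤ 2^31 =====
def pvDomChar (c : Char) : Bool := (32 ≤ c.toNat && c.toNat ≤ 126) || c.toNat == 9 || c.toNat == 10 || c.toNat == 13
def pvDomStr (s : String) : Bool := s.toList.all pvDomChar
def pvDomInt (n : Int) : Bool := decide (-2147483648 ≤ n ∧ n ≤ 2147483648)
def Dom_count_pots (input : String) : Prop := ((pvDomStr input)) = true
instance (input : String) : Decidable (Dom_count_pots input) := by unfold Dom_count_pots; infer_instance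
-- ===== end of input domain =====

-- B replaces A's branching index loop by building a character-frequency dictionary and
-- combining the 'B' and 'C' frequencies arithmetically ('alternative', same cost).

-- ===== PORT A =====
-- A: p = 0; for i in range(len(input)): if input[i]=='B': p+=1 elif input[i]=='C': p+=3; return p
-- (input[i] is always in range here, so pyGetD with a dummy default is a pure totality guard)
def count_pots (input : String) : Int :=
  (PySem.List.pyRange 0 (PySem.Str.len input) 1).foldl
    (fun p i =>
      if PySem.List.pyGetD input.toList i ' ' = 'B' then p + 1
      else if PySem.List.pyGetD input.toList i ' ' = 'C' then p + 3
      else p) 0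

-- ===== PORT B =====
-- B: freq = {}; for ch in input: freq[ch] = freq.get(ch,0)+1; return freq.get('B',0) + 3*freq.get('C',0)
def count_pots_alt (input : String) : Int :=
  let freq : PySem.Dict Char Int :=
    input.toList.foldl (fun d ch => d.insert ch (d.getD ch 0 + 1)) PySem.Dict.empty
  freq.getD 'B' 0 + 3 * freq.getD 'C' 0

-- ===== PRECONDITION & SPEC =====
def Spec_count_pots (input : String) (out : Int) : Prop := out = count_pots_alt input
instance (input : String) (out : Int) : Decidable (Spec_count_pots input out) := by unfold Spec_count_pots; infer_instance

-- ===== CLAIM (what is proved, stated in full; the proofs are below) =====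
def Claim_equal_count_pots : Prop := ∀ (input : String), Dom_count_pots input → Spec_count_pots input (count_pots input)

-- ===== LEMMAS AND PROOFS =====

-- A's branching accumulator over the character list, in closed form.
theorem foldl_branch (l : List Char) (a : Int) :
    l.foldl (fun p c => if c = 'B' then p + 1 else if c = 'C' then p + 3 else p) a
      = a + (l.count 'B' : Int) + 3 * (l.count 'C' : Int) := by
  induction l generalizing a with
  | nil => simp
  | cons h t ih =>
    by_cases hb : h = 'B'
    · subst hb; simp [List.foldl_cons, ih]; ring
    · by_cases hc : h = 'C'
      · subst hc; simp [List.foldl_cons, ih, hb]; ring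
      · simp [List.foldl_cons, ih, hb, hc]

-- ===== VERDICT (by name: the statement is the Claim_ definition above) =====
theorem count_pots_spec : Claim_equal_count_pots := by
  intro input _
  unfold Spec_count_pots count_pots count_pots_alt
  have h := PySem.List.foldl_pyRange_zero_pyGetD input.toList ' '
    (fun (p : Int) c => if c = 'B' then p + 1 else if c = 'C' then p + 3 else p) (0 : Int)
  simp only [pysem] at h ⊢
  refine Eq.trans h ?_
  rw [foldl_branch]
  ring
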